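-- pv_equiv track=rewrite | github.com/thehalleyyoung/a3-python | a3_python/unsafe/deadlock.py | _detect_lock_ordering_violation
-- ===== SOURCE A (Python) =====
-- def _detect_lock_ordering_violation(acquisition_orders: list) -> bool:
--     """
--     Detect lock ordering violations (incompatible orders).
--
--     acquisition_orders: list of (thread_id, lock_sequence) tuples
--     Example:
--     [
--         ('T1', ['lockA', 'lockB']),  # T1 acquired A then B
--         ('T2', ['lockB', 'lockA'])   # T2 acquired B then A => violation!
--     ]
--
--     For each pair of locks (L1, L2), check if we've seen:
--     - Some thread acquire L1 before L2
--     - Some other thread acquire L2 before L1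
--     This indicates potential deadlock (lock ordering violation).
--     """
--     if not acquisition_orders:
--         return False
--
--     # Build lock pairs: (lock1, lock2) means lock1 acquired before lock2
--     seen_orders = {}  # (lock1, lock2) -> set of thread_ids that observed this order
--
--     for thread_id, lock_seq in acquisition_orders:
--         for i in range(len(lock_seq)):
--             for j in range(i + 1, len(lock_seq)):
--                 lock1, lock2 = lock_seq[i], lock_seq[j]
--                 if lock1 == lock2:
--                     continue  # Skip same lock (reentrant)
--
--                 pair = (lock1, lock2)
--                 if pair not in seen_orders:
--                     seen_orders[pair] = set()
--                 seen_orders[pair].add(thread_id)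
--
--     # Check for conflicting orders
--     for (lock1, lock2), threads in seen_orders.items():
--         reverse_pair = (lock2, lock1)
--         if reverse_pair in seen_orders:
--             # Found conflicting order: some threads acquired lock1->lock2,
--             # others acquired lock2->lock1
--             # This is a lock ordering violation (potential deadlock)
--             return True
--
--     return False
-- ===== SOURCE B (Python) =====
-- def _detect_lock_ordering_violation(acquisition_orders: list) -> bool:
--     if not acquisition_orders:
--         return False
--     seen = set()  # directed (lock1, lock2) pairs observed so far
--     for _thread_id, lock_seq in acquisition_orders:
--         rest = lock_seq
--         while rest:
--             first, rest = rest[0], rest[1:]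
--             for second in rest:
--                 if first == second:
--                     continue
--                 if (second, first) in seen:
--                     return True
--                 seen.add((first, second))
--     return False
-- ===== Notes on version B (the rewrite author's own statement) =====
-- stated objective: simpler
-- what changed: A builds a dict mapping every directed lock pair to the set of thread ids that observed it and then rescans all dict entries looking for a reversed key; B keeps one plain set of directed pairs and makes a single early-exit pass, returning True the moment a pair's reverse has already been seen, so the thread-id sets and the whole second scan disappear.
import Mathlib
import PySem

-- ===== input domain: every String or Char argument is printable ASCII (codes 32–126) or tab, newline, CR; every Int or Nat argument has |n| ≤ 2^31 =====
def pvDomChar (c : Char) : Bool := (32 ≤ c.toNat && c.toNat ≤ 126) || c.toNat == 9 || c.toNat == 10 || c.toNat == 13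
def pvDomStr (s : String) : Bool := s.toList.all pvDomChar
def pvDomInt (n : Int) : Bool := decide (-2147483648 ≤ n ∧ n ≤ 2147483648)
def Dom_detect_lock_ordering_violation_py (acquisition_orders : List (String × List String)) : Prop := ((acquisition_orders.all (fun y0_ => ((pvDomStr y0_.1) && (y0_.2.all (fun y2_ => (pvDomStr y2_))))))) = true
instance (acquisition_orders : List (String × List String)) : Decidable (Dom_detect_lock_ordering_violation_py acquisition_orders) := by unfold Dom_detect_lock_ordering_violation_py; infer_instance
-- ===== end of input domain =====

-- B replaces A's build-the-whole-dict-of-orderings-then-rescan with a single early-exit pass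
-- over a set of directed pairs (objective: simpler/faster single pass; same return value).

-- ===== PORT A =====
-- innermost loop body of A's build phase (lock1 = lock_seq[i], lock2 = lock_seq[j])
def pvA_innerStep (thread_id : String) (lock_seq : List String) (i : Int)
    (d : PySem.Dict (String × String) (PySem.Set String)) (j : Int) :
    PySem.Dict (String × String) (PySem.Set String) :=
  let lock1 := PySem.List.pyGetD lock_seq i ""
  let lock2 := PySem.List.pyGetD lock_seq j ""
  if lock1 == lock2 then d
  else
    let pair := (lock1, lock2)
    let d1 := if d.contains pair then d else d.insert pair PySem.Set.empty
    d1.modify pair PySem.Set.empty (fun s => PySem.Set.add s thread_id)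

-- A's build phase: the seen_orders dict after the triple loop
def pvA_build (acquisition_orders : List (String × List String)) :
    PySem.Dict (String × String) (PySem.Set String) :=
  acquisition_orders.foldl
    (fun d tl =>
      (PySem.List.pyRange 0 (PySem.List.len tl.2) 1).foldl
        (fun d i =>
          (PySem.List.pyRange (i + 1) (PySem.List.len tl.2) 1).foldl
            (pvA_innerStep tl.1 tl.2 i) d)
        d)
    PySem.Dict.empty

def detect_lock_ordering_violation_py (acquisition_orders : List (String × List String)) : Bool :=
  if acquisition_orders.isEmpty then false
  else
    let seen_orders := pvA_build acquisition_orders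
    seen_orders.items.any (fun p => seen_orders.contains (p.1.2, p.1.1))

-- ===== PORT B =====
-- 'for second in rest' with early return: none = violation found, some = updated seen set
def pvB_inner (first : String) : List String → PySem.Set (String × String) →
    Option (PySem.Set (String × String))
  | [], seen => some seen
  | second :: rest, seen =>
    if first == second then pvB_inner first rest seen
    else if PySem.Set.contains seen (second, first) then none
    else pvB_inner first rest (PySem.Set.add seen (first, second))

-- 'while rest: first, rest = rest[0], rest[1:]'
def pvB_seq : List String → PySem.Set (String × String) →
    Option (PySem.Set (String × String))
  | [], seen => some seen
  | first :: rest, seen =>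
    match pvB_inner first rest seen with
    | none => none
    | some seen1 => pvB_seq rest seen1

-- 'for _thread_id, lock_seq in acquisition_orders'
def pvB_loop : List (String × List String) → PySem.Set (String × String) → Bool
  | [], _ => false
  | o :: os, seen =>
    match pvB_seq o.2 seen with
    | none => true
    | some seen1 => pvB_loop os seen1

def detect_lock_ordering_violation_py_alt (acquisition_orders : List (String × List String)) : Bool :=
  if acquisition_orders.isEmpty then false
  else pvB_loop acquisition_orders PySem.Set.empty

-- ===== PRECONDITION & SPEC =====
def Spec_detect_lock_ordering_violation_py (acquisition_orders : List (String × List String)) (out : Bool) : Prop := out = detect_lock_ordering_violation_py_alt acquisition_orders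
instance (acquisition_orders : List (String × List String)) (out : Bool) : Decidable (Spec_detect_lock_ordering_violation_py acquisition_orders out) := by unfold Spec_detect_lock_ordering_violation_py; infer_instance

-- ===== CLAIM (what is proved, stated in full; the proofs are below) =====
def Claim_equal_detect_lock_ordering_violation_py : Prop := ∀ (acquisition_orders : List (String × List String)), Dom_detect_lock_ordering_violation_py acquisition_orders → Spec_detect_lock_ordering_violation_py acquisition_orders (detect_lock_ordering_violation_py acquisition_orders)

-- ===== LEMMAS AND PROOFS =====

-- the ordered pairs (with distinct locks) contributed by one first lock and the rest of its sequence
def pvInnerPairs (a : String) (l : List String) : List (String × String) :=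
  l.flatMap (fun b => if a == b then [] else [(a, b)])

-- all ordered pairs contributed by one sequence
def pvSeqPairs : List String → List (String × String)
  | [] => []
  | a :: rest => pvInnerPairs a rest ++ pvSeqPairs rest

-- all ordered pairs contributed by all sequences
def pvAllPairs (orders : List (String × List String)) : List (String × String) :=
  orders.flatMap (fun o => pvSeqPairs o.2)

-- reference single pass over a flat pair list (none = violation found)
def pvConflict : List (String × String) → PySem.Set (String × String) →
    Option (PySem.Set (String × String))
  | [], s => some s
  | p :: ps, s =>
    if PySem.Set.contains s (p.2, p.1) then none
    else pvConflict ps (PySem.Set.add s p)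

-- generic key-membership invariant for A's dict-building folds
lemma pv_foldl_contains {ι : Type}
    (step : PySem.Dict (String × String) (PySem.Set String) → ι →
      PySem.Dict (String × String) (PySem.Set String))
    (contrib : ι → List (String × String)) :
    ∀ (xs : List ι),
      (∀ d x, x ∈ xs → ∀ q, (step d x).contains q = (d.contains q || decide (q ∈ contrib x))) →
      ∀ d q, (xs.foldl step d).contains q = (d.contains q || decide (q ∈ xs.flatMap contrib)) := by
  intro xs
  induction xs with
  | nil => intro _ d q; simp
  | cons x xs ih =>
    intro h d q
    have := ih (fun d y hy q => h d y (List.mem_cons_of_mem _ hy) q) (step d x) q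
    simp only [List.foldl_cons, this, h d x (List.mem_cons_self) q,
      List.flatMap_cons, List.mem_append]
    cases hc : d.contains q <;> by_cases h1 : q ∈ contrib x <;>
      by_cases h2 : q ∈ xs.flatMap contrib <;> simp [h1, h2]

lemma pvA_innerStep_contains (tid : String) (seq : List String) (i : Int)
    (d : PySem.Dict (String × String) (PySem.Set String)) (j : Int) (q : String × String) :
    (pvA_innerStep tid seq i d j).contains q =
      (d.contains q ||
        decide (q ∈ (if PySem.List.pyGetD seq i "" == PySem.List.pyGetD seq j "" then
          ([] : List (String × String))
          else [(PySem.List.pyGetD seq i "", PySem.List.pyGetD seq j "")]))) := by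
  unfold pvA_innerStep
  cases h : (PySem.List.pyGetD seq i "" == PySem.List.pyGetD seq j "") with
  | true => simp [h]
  | false =>
    simp only [h, Bool.false_eq_true, if_false]
    rw [PySem.Dict.contains_modify]
    by_cases hc : d.contains (PySem.List.pyGetD seq i "", PySem.List.pyGetD seq j "") = true <;>
      simp only [hc, if_true] <;>
      cases hq : (q == (PySem.List.pyGetD seq i "", PySem.List.pyGetD seq j "")) <;>
      cases hdq : d.contains q <;>
      simp_all [PySem.Dict.contains_insert, beq_iff_eq]

lemma pvA_inner_contains (tid : String) (seq : List String) (i : Int) (hi : 0 ≤ i)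
    (d : PySem.Dict (String × String) (PySem.Set String)) (q : String × String) :
    ((PySem.List.pyRange (i + 1) (PySem.List.len seq) 1).foldl (pvA_innerStep tid seq i) d).contains q
      = (d.contains q ||
          decide (q ∈ pvInnerPairs (PySem.List.pyGetD seq i "") (seq.drop (i + 1).toNat))) := by
  rw [pv_foldl_contains (pvA_innerStep tid seq i)
    (fun j => if PySem.List.pyGetD seq i "" == PySem.List.pyGetD seq j "" then []
      else [(PySem.List.pyGetD seq i "", PySem.List.pyGetD seq j "")])
    _ (fun d j _ q => pvA_innerStep_contains tid seq i d j q)]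
  have e : (PySem.List.pyRange (i + 1) (PySem.List.len seq) 1).flatMap
      (fun j => if PySem.List.pyGetD seq i "" == PySem.List.pyGetD seq j "" then
        ([] : List (String × String))
        else [(PySem.List.pyGetD seq i "", PySem.List.pyGetD seq j "")])
      = pvInnerPairs (PySem.List.pyGetD seq i "") (seq.drop (i + 1).toNat) := by
    rw [← List.flatMap_map (fun j => PySem.List.pyGetD seq j "")
      (fun b => if PySem.List.pyGetD seq i "" == b then ([] : List (String × String))
        else [(PySem.List.pyGetD seq i "", b)]),
      PySem.List.map_pyGetD_pyRange seq "" (by omega)]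
    rfl
  rw [e]

lemma pv_range_flatMap_nat (seq : List String) :
    (List.range seq.length).flatMap
        (fun k => pvInnerPairs (seq.getD k "") (seq.drop (k + 1))) = pvSeqPairs seq := by
  induction seq with
  | nil => rfl
  | cons a rest ih =>
    rw [List.length_cons, List.range_succ_eq_map, List.flatMap_cons, List.flatMap_map]
    simp only [Nat.succ_eq_add_one, List.getD_cons_zero, List.getD_cons_succ,
      List.drop_succ_cons, List.drop_zero]
    rw [ih]
    rfl

lemma pvA_seq_contains (tid : String) (seq : List String)
    (d : PySem.Dict (String × String) (PySem.Set String)) (q : String × String) :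
    ((PySem.List.pyRange 0 (PySem.List.len seq) 1).foldl
        (fun d i => (PySem.List.pyRange (i + 1) (PySem.List.len seq) 1).foldl
          (pvA_innerStep tid seq i) d) d).contains q
      = (d.contains q || decide (q ∈ pvSeqPairs seq)) := by
  rw [pv_foldl_contains _
    (fun i => pvInnerPairs (PySem.List.pyGetD seq i "") (seq.drop (i + 1).toNat))
    _ (fun d i hi q => pvA_inner_contains tid seq i (PySem.List.mem_pyRange_one.mp hi).1 d q)]
  have e : (PySem.List.pyRange 0 (PySem.List.len seq) 1).flatMap
      (fun i => pvInnerPairs (PySem.List.pyGetD seq i "") (seq.drop (i + 1).toNat))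
      = pvSeqPairs seq := by
    rw [PySem.List.pyRange_one, List.flatMap_map]
    have e2 : ∀ k : Nat, pvInnerPairs (PySem.List.pyGetD seq ((0 : Int) + k) "")
        (seq.drop ((0 : Int) + k + 1).toNat)
        = pvInnerPairs (seq.getD k "") (seq.drop (k + 1)) := by
      intro k
      have h1 : (0 : Int) + k = (k : Int) := by omega
      have h2 : ((k : Int) + 1).toNat = k + 1 := by omega
      rw [h1, PySem.List.pyGetD_natCast, h2]
    simp only [e2]
    have h3 : (PySem.List.len seq - 0).toNat = seq.length := by
      simp [PySem.List.len_eq]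
    rw [h3]
    exact pv_range_flatMap_nat seq
  rw [e]

lemma pvA_build_contains (orders : List (String × List String)) (q : String × String) :
    (pvA_build orders).contains q = decide (q ∈ pvAllPairs orders) := by
  unfold pvA_build
  rw [pv_foldl_contains _ (fun tl => pvSeqPairs tl.2)
    _ (fun d tl _ q => pvA_seq_contains tl.1 tl.2 d q), PySem.Dict.contains_empty,
    Bool.false_or]
  rfl

lemma pvB_inner_eq (a : String) (l : List String) (s : PySem.Set (String × String)) :
    pvB_inner a l s = pvConflict (pvInnerPairs a l) s := by
  induction l generalizing s with
  | nil => rfl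
  | cons b rest ih =>
    rw [pvB_inner]
    cases h : (a == b) with
    | true =>
      simp only [h, if_true, pvInnerPairs, List.flatMap_cons, List.nil_append] at *
      rw [ih]
    | false =>
      simp only [h, Bool.false_eq_true, if_false, pvInnerPairs, List.flatMap_cons,
        List.singleton_append, pvConflict, ih]

lemma pvConflict_append (ps qs : List (String × String)) (s : PySem.Set (String × String)) :
    pvConflict (ps ++ qs) s =
      match pvConflict ps s with
      | none => none
      | some s1 => pvConflict qs s1 := by
  induction ps generalizing s with
  | nil => rfl
  | cons p ps ih =>
    rw [List.cons_append, pvConflict, pvConflict]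
    cases h : PySem.Set.contains s (p.2, p.1) with
    | true => rfl
    | false => exact ih (PySem.Set.add s p)

lemma pvB_seq_eq (seq : List String) (s : PySem.Set (String × String)) :
    pvB_seq seq s = pvConflict (pvSeqPairs seq) s := by
  induction seq generalizing s with
  | nil => rfl
  | cons a rest ih =>
    rw [pvB_seq, pvB_inner_eq, pvSeqPairs, pvConflict_append]
    cases pvConflict (pvInnerPairs a rest) s with
    | none => rfl
    | some s1 => exact ih s1

lemma pvB_loop_eq (orders : List (String × List String)) (s : PySem.Set (String × String)) :
    pvB_loop orders s = (pvConflict (pvAllPairs orders) s).isNone := by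
  induction orders generalizing s with
  | nil => rfl
  | cons o os ih =>
    rw [pvB_loop, pvB_seq_eq]
    have e : pvAllPairs (o :: os) = pvSeqPairs o.2 ++ pvAllPairs os := by
      simp [pvAllPairs]
    rw [e, pvConflict_append]
    cases pvConflict (pvSeqPairs o.2) s with
    | none => rfl
    | some s1 => exact ih s1

lemma pv_mem_innerPairs_ne {a : String} {l : List String} {p : String × String}
    (hp : p ∈ pvInnerPairs a l) : p.1 ≠ p.2 := by
  unfold pvInnerPairs at hp
  rcases List.mem_flatMap.mp hp with ⟨b, _, hb⟩
  cases h : (a == b) with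
  | true => rw [h] at hb; simp at hb
  | false =>
    rw [h] at hb
    simp only [Bool.false_eq_true, if_false, List.mem_singleton] at hb
    subst hb
    exact ne_of_beq_false h

lemma pv_mem_seqPairs_ne {seq : List String} {p : String × String}
    (hp : p ∈ pvSeqPairs seq) : p.1 ≠ p.2 := by
  induction seq with
  | nil => simp [pvSeqPairs] at hp
  | cons a rest ih =>
    rw [pvSeqPairs] at hp
    rcases List.mem_append.mp hp with h | h
    · exact pv_mem_innerPairs_ne h
    · exact ih h

lemma pv_mem_allPairs_ne {orders : List (String × List String)} {p : String × String}
    (hp : p ∈ pvAllPairs orders) : p.1 ≠ p.2 := by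
  rcases List.mem_flatMap.mp hp with ⟨o, _, ho⟩
  exact pv_mem_seqPairs_ne ho

lemma pvConflict_none_iff (ps : List (String × String)) (s : PySem.Set (String × String))
    (hps : ∀ p ∈ ps, p.1 ≠ p.2) :
    (pvConflict ps s).isNone = true ↔ ∃ p ∈ ps, (p.2, p.1) ∈ s ∨ (p.2, p.1) ∈ ps := by
  induction ps generalizing s with
  | nil => simp [pvConflict]
  | cons p ps ih =>
    rw [pvConflict]
    cases h : PySem.Set.contains s (p.2, p.1) with
    | true =>
      simp only [if_true, Option.isNone_none, true_iff]
      exact ⟨p, List.mem_cons_self .., Or.inl ((PySem.Set.contains_iff s _).mp h)⟩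
    | false =>
      have hns : (p.2, p.1) ∉ s := fun hm => by
        rw [(PySem.Set.contains_iff s _).mpr hm] at h; cases h
      simp only [Bool.false_eq_true, if_false]
      rw [ih (PySem.Set.add s p) (fun q hq => hps q (List.mem_cons_of_mem _ hq))]
      constructor
      · rintro ⟨q, hq, hin | hin⟩
        · rcases (PySem.Set.mem_add s p _).mp hin with hin2 | heq
          · exact ⟨q, List.mem_cons_of_mem _ hq, Or.inl hin2⟩
          · exact ⟨q, List.mem_cons_of_mem _ hq, Or.inr (heq ▸ List.mem_cons_self ..)⟩
        · exact ⟨q, List.mem_cons_of_mem _ hq, Or.inr (List.mem_cons_of_mem _ hin)⟩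
      · rintro ⟨q, hq, hcase⟩
        rcases List.mem_cons.mp hq with rfl | hq2
        · rcases hcase with hin | hin
          · exact absurd hin hns
          · rcases List.mem_cons.mp hin with heq | hin2
            · exact absurd (congrArg Prod.fst heq).symm (hps q (List.mem_cons_self ..))
            · refine ⟨(q.2, q.1), hin2, Or.inl ?_⟩
              exact (PySem.Set.mem_add s q _).mpr (Or.inr rfl)
        · rcases hcase with hin | hin
          · exact ⟨q, hq2, Or.inl ((PySem.Set.mem_add s p _).mpr (Or.inl hin))⟩
          · rcases List.mem_cons.mp hin with heq | hin2
            · exact ⟨q, hq2, Or.inl ((PySem.Set.mem_add s p _).mpr (Or.inr heq))⟩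
            · exact ⟨q, hq2, Or.inr hin2⟩

-- ===== VERDICT (by name: the statement is the Claim_ definition above) =====
lemma pvA_true_iff (orders : List (String × List String)) (h : orders.isEmpty = false) :
    detect_lock_ordering_violation_py orders = true ↔
      ∃ q ∈ pvAllPairs orders, (q.2, q.1) ∈ pvAllPairs orders := by
  rw [detect_lock_ordering_violation_py]
  simp only [h, Bool.false_eq_true, if_false]
  rw [List.any_eq_true]
  constructor
  · rintro ⟨pr, hpr, hc⟩
    have hk : pr.1 ∈ pvAllPairs orders := by
      have h2 := (PySem.Dict.contains_iff_mem_keys (pvA_build orders) pr.1).mpr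
        (PySem.Dict.mem_keys_of_mem_items _ hpr)
      rwa [pvA_build_contains, decide_eq_true_eq] at h2
    have hsw : (pr.1.2, pr.1.1) ∈ pvAllPairs orders := by
      rwa [pvA_build_contains, decide_eq_true_eq] at hc
    exact ⟨pr.1, hk, hsw⟩
  · rintro ⟨q, hq, hsw⟩
    have hc : (pvA_build orders).contains q = true := by
      rw [pvA_build_contains]; exact decide_eq_true hq
    have hkq : q ∈ (pvA_build orders).keys := (PySem.Dict.contains_iff_mem_keys _ _).mp hc
    rw [PySem.Dict.keys] at hkq
    rcases List.mem_map.mp hkq with ⟨pr, hpr, rfl⟩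
    exact ⟨pr, hpr, by rw [pvA_build_contains]; exact decide_eq_true hsw⟩

lemma pvB_true_iff (orders : List (String × List String)) (h : orders.isEmpty = false) :
    detect_lock_ordering_violation_py_alt orders = true ↔
      ∃ q ∈ pvAllPairs orders, (q.2, q.1) ∈ pvAllPairs orders := by
  rw [detect_lock_ordering_violation_py_alt]
  simp only [h, Bool.false_eq_true, if_false]
  rw [pvB_loop_eq, pvConflict_none_iff _ _ (fun p hp => pv_mem_allPairs_ne hp)]
  simp [PySem.Set.empty]

theorem detect_lock_ordering_violation_py_spec : Claim_equal_detect_lock_ordering_violation_py := by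
  intro orders _
  unfold Spec_detect_lock_ordering_violation_py
  cases h : orders.isEmpty with
  | true =>
    rw [detect_lock_ordering_violation_py, detect_lock_ordering_violation_py_alt]
    simp [h]
  | false =>
    rw [Bool.eq_iff_iff, pvA_true_iff orders h, pvB_true_iff orders h]
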